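-- pv_equiv track=rewrite | github.com/mayasss-gif/BiRAGAS-Unified-Application | agentic_ai_wf/ipaa_causality/run_engine2_3_mechanistic.py | _bfs_upstream_unsigned
-- ===== SOURCE A (Python) =====
-- from collections import deque
-- from typing import Dict, List, Optional, Set, Tuple
--
-- def _bfs_upstream_unsigned(incoming: Dict[str, List[str]], tf: str, max_steps: int) -> Dict[str, int]:
--     best: Dict[str, int] = {tf: 0}
--     q = deque([(tf, 0)])
--     while q:
--         node, depth = q.popleft()
--         if depth >= max_steps:
--             continue
--         for src in incoming.get(node, []):
--             nd = depth + 1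
--             if src not in best or nd < best[src]:
--                 best[src] = nd
--                 q.append((src, nd))
--     return best
-- ===== SOURCE B (Python) =====
-- def _bfs_upstream_unsigned(incoming, tf, max_steps):
--     # Phase 1: compute the BFS level decomposition (list of levels), no distances stored.
--     levels = [[tf]]
--     visited = {tf}
--     while levels[-1] and len(levels) <= max_steps:
--         cand = [s for node in levels[-1] for s in incoming.get(node, [])]
--         cur = list(dict.fromkeys(s for s in cand if s not in visited))
--         visited.update(cur)
--         levels.append(cur)
--     # Phase 2: assemble the distance map from the levels.
--     return {node: d for d, level in enumerate(levels) for node in level}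
-- ===== Notes on version B (the rewrite author's own statement) =====
-- stated objective: alternative
-- what changed: Two staged passes instead of a one-pass queue-driven dict build: phase 1 computes the BFS level decomposition as a list of levels (each level a bulk flatMap-filter-ordered-dedup pipeline over the previous level, with only a visited set), phase 2 assembles the distance dict in one enumerate comprehension; no deque, no (node,depth) pairs, no relaxation check.
import Mathlib
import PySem

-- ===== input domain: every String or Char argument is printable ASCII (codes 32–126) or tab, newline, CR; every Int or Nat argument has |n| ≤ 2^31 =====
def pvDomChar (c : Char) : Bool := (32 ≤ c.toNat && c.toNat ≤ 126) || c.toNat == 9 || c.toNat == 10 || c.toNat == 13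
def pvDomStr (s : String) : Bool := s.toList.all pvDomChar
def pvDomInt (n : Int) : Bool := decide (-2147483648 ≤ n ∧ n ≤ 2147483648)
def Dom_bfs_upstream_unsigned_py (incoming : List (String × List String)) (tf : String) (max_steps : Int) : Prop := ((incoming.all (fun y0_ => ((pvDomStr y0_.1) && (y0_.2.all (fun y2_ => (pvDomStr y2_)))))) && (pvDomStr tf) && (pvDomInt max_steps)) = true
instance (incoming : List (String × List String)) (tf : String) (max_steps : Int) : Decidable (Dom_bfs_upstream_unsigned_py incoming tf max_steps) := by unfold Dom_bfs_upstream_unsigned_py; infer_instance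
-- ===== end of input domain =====

-- B is a two-phase rewrite of A's one-pass queue BFS: phase 1 computes the level decomposition
-- (bulk flatMap / filter / ordered-dedup per level, a visited set instead of a dict and a deque of
-- (node, depth) pairs), phase 2 assembles the distance dict in one enumerate fold; same return value.

-- ===== PORT A =====
-- incoming.get(node, []) : first-match association-list lookup (dict convention)
def pvGetSrcs (incoming : List (String × List String)) (node : String) : List String :=
  (List.lookup node incoming).getD []

-- body of A's inner 'for src in incoming.get(node, [])' loop; state = (best, queue)
def pvStepA (depth : Int) (st : PySem.Dict String Int × List (String × Int)) (src : String) :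
    PySem.Dict String Int × List (String × Int) :=
  let nd := depth + 1
  match st.1.get? src with
  | none => (st.1.insert src nd, st.2 ++ [(src, nd)])
  | some v => if nd < v then (st.1.insert src nd, st.2 ++ [(src, nd)]) else st

-- potential keys (used only to size the fuel that makes 'while q:' total)
def pvAllSrcs (incoming : List (String × List String)) : List String :=
  ((incoming.map Prod.snd).flatten).dedup

-- fuel only makes A's 'while q:' loop total; pv_sim below shows the chosen fuel suffices
def pvLoopA (incoming : List (String × List String)) (max_steps : Int) (fuel : Nat)
    (best : PySem.Dict String Int) (q : List (String × Int)) : PySem.Dict String Int :=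
  match q, fuel with
  | [], _ => best
  | _ :: _, 0 => best
  | (node, depth) :: rest, f + 1 =>
    if max_steps ≤ depth then pvLoopA incoming max_steps f best rest
    else
      let st := (pvGetSrcs incoming node).foldl (pvStepA depth) (best, rest)
      pvLoopA incoming max_steps f st.1 st.2

def bfs_upstream_unsigned_py (incoming : List (String × List String)) (tf : String) (max_steps : Int) : List (String × Int) :=
  (pvLoopA incoming max_steps ((pvAllSrcs incoming).length + 2)
    (PySem.Dict.insert PySem.Dict.empty tf 0) [(tf, 0)]).items

-- ===== PORT B =====
-- cand = [s for node in frontier for s in incoming.get(node, [])];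
-- cur = list(dict.fromkeys(s for s in cand if s not in visited))
def pvNewLevel (incoming : List (String × List String)) (visited : PySem.Set String)
    (frontier : List String) : List String :=
  let cand := frontier.flatMap (fun node => pvGetSrcs incoming node)
  PySem.List.dedup (cand.filter (fun s => !(PySem.Set.contains visited s)))

-- 'while levels[-1] and len(levels) <= max_steps:' — one iteration per appended level,
-- so the remaining allowance max_steps - (len(levels) - 1) is the structural fuel
def pvLoopB (incoming : List (String × List String)) :
    Nat → PySem.Set String → List (List String) → List String → List (List String)
  | 0, _, levels, _ => levels
  | m + 1, visited, levels, last =>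
    if last.isEmpty then levels
    else
      let cur := pvNewLevel incoming visited last
      pvLoopB incoming m (PySem.Set.update visited cur) (levels ++ [cur]) cur

def bfs_upstream_unsigned_py_alt (incoming : List (String × List String)) (tf : String) (max_steps : Int) : List (String × Int) :=
  let levels := pvLoopB incoming max_steps.toNat (PySem.Set.ofList [tf]) [[tf]] [tf]
  -- {node: d for d, level in enumerate(levels) for node in level}
  ((PySem.List.enumerate levels 0).foldl
    (fun dict p => p.2.foldl (fun dict node => dict.insert node p.1) dict)
    PySem.Dict.empty).items

-- ===== PRECONDITION & SPEC =====
def Spec_bfs_upstream_unsigned_py (incoming : List (String × List String)) (tf : String) (max_steps : Int) (out : List (String × Int)) : Prop := out = bfs_upstream_unsigned_py_alt incoming tf max_steps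
instance (incoming : List (String × List String)) (tf : String) (max_steps : Int) (out : List (String × Int)) : Decidable (Spec_bfs_upstream_unsigned_py incoming tf max_steps out) := by unfold Spec_bfs_upstream_unsigned_py; infer_instance

-- ===== CLAIM (what is proved, stated in full; the proofs are below) =====
def Claim_equal_bfs_upstream_unsigned_py : Prop := ∀ (incoming : List (String × List String)) (tf : String) (max_steps : Int), Dom_bfs_upstream_unsigned_py incoming tf max_steps → Spec_bfs_upstream_unsigned_py incoming tf max_steps (bfs_upstream_unsigned_py incoming tf max_steps)

-- ===== LEMMAS AND PROOFS =====

-- every value stored in best is ≤ d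
def pvValB (best : PySem.Dict String Int) (d : Int) : Prop :=
  ∀ k v, best.get? k = some v → v ≤ d

-- number of potential keys not yet discovered
def pvUndisc (incoming : List (String × List String)) (best : PySem.Dict String Int) : Nat :=
  ((pvAllSrcs incoming).filter (fun s => (best.get? s).isNone)).length

-- streaming discovery: the dict/list pair A's inner loop really builds, per candidate source
def pvDisc (d1 : Int) (best : PySem.Dict String Int) : List String → PySem.Dict String Int × List String
  | [] => (best, [])
  | s :: rest =>
    if best.contains s then pvDisc d1 best rest
    else
      let r := pvDisc d1 (best.insert s d1) rest
      (r.1, s :: r.2)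

-- insert one whole level at depth d / all levels from depth d on
def pvInsLevel (best : PySem.Dict String Int) (d : Int) (L : List String) : PySem.Dict String Int :=
  L.foldl (fun b s => b.insert s d) best

def pvInsLevels (best : PySem.Dict String Int) (d : Int) : List (List String) → PySem.Dict String Int
  | [] => best
  | L :: Ls => pvInsLevels (pvInsLevel best d L) (d + 1) Ls

-- the levels pvLoopB still has to append
def pvTail (incoming : List (String × List String)) :
    Nat → PySem.Set String → List String → List (List String)
  | 0, _, _ => []
  | m + 1, visited, last =>
    if last.isEmpty then []
    else
      let cur := pvNewLevel incoming visited last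
      cur :: pvTail incoming m (PySem.Set.update visited cur) cur

-- visited mirrors best's key set
def pvAgree (v : PySem.Set String) (best : PySem.Dict String Int) : Prop :=
  ∀ s, PySem.Set.contains v s = best.contains s

lemma pv_mem_getSrcs {incoming : List (String × List String)} {node s : String}
    (h : s ∈ pvGetSrcs incoming node) : s ∈ pvAllSrcs incoming := by
  unfold pvGetSrcs at h
  cases hl : List.lookup node incoming with
  | none => rw [hl] at h; simp at h
  | some b =>
    rw [hl] at h; simp at h
    have hb : b ∈ incoming.map Prod.snd := by
      clear h
      induction incoming with
      | nil => simp [List.lookup] at hl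
      | cons p rest ih =>
        obtain ⟨k, v⟩ := p
        rw [List.lookup] at hl
        by_cases hk : node == k
        · rw [hk] at hl; simp at hl; simp [← hl]
        · rw [Bool.not_eq_true] at hk; rw [hk] at hl; simp [ih hl]
    exact List.mem_dedup.mpr (List.mem_flatten.mpr ⟨b, hb, h⟩)

lemma pv_filter_flip {α : Type} (p q : α → Bool) (a : α) :
    ∀ l : List α, l.Nodup → a ∈ l → p a = true → q a = false →
      (∀ x, x ≠ a → q x = p x) →
      (l.filter q).length + 1 = (l.filter p).length := by
  intro l
  induction l with
  | nil => intro _ ha; simp at ha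
  | cons x xs ih =>
    intro hn hmem hp hq hagree
    rcases List.nodup_cons.mp hn with ⟨hxnot, hns⟩
    by_cases hxa : x = a
    · subst hxa
      have hfq : xs.filter q = xs.filter p := by
        apply List.filter_congr
        intro y hy
        exact hagree y (fun hya => hxnot (hya ▸ hy))
      simp [hp, hq, hfq]
    · have hmem' : a ∈ xs := by
        rcases List.mem_cons.mp hmem with h | h
        · exact absurd h.symm hxa
        · exact h
      have hqx : q x = p x := hagree x hxa
      rcases hpx : p x with _ | _
      · simp [hpx, hqx, ih hns hmem' hp hq hagree]
      · simp [hpx, hqx, ih hns hmem' hp hq hagree]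

lemma pv_undisc_insert (incoming : List (String × List String)) (best : PySem.Dict String Int)
    (src : String) (v : Int) (h : best.get? src = none) (hm : src ∈ pvAllSrcs incoming) :
    pvUndisc incoming (best.insert src v) + 1 = pvUndisc incoming best := by
  unfold pvUndisc
  apply pv_filter_flip (fun s => (best.get? s).isNone)
    (fun s => ((best.insert src v).get? s).isNone) src _ (List.nodup_dedup _) hm
  · simp [h]
  · simp [PySem.Dict.get?_insert_self]
  · intro x hx
    simp [PySem.Dict.get?_insert_of_ne best v hx]

-- A's inner loop over one node's sources realises pvDisc
lemma pv_inner (incoming : List (String × List String)) (d : Int) :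
    ∀ (srcs : List String) (best : PySem.Dict String Int) (accA : List (String × Int)),
      pvValB best (d + 1) →
      (∀ s ∈ srcs, s ∈ pvAllSrcs incoming) →
      (srcs.foldl (pvStepA d) (best, accA)).1 = (pvDisc (d + 1) best srcs).1 ∧
      (srcs.foldl (pvStepA d) (best, accA)).2
        = accA ++ (pvDisc (d + 1) best srcs).2.map (fun s => (s, d + 1)) ∧
      pvValB (pvDisc (d + 1) best srcs).1 (d + 1) ∧
      (pvDisc (d + 1) best srcs).2.length + pvUndisc incoming (pvDisc (d + 1) best srcs).1
        = pvUndisc incoming best := by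
  intro srcs
  induction srcs with
  | nil =>
    intro best accA hval _
    exact ⟨rfl, by simp [pvDisc], by simpa [pvDisc] using hval, by simp [pvDisc]⟩
  | cons s rest ih =>
    intro best accA hval hsrc
    rcases hg : best.get? s with _ | v
    · -- fresh key: insert and keep
      have hcontains : best.contains s = false := by
        rw [PySem.Dict.contains_eq_isSome_get?, hg]; rfl
      have hstepA : pvStepA d (best, accA) s =
          (best.insert s (d + 1), accA ++ [(s, d + 1)]) := by
        unfold pvStepA; simp [hg]
      have hval' : pvValB (best.insert s (d + 1)) (d + 1) := by
        intro k v hk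
        rw [PySem.Dict.get?_insert] at hk
        by_cases hks : k = s
        · rw [if_pos hks] at hk; simp only [Option.some.injEq] at hk; omega
        · rw [if_neg hks] at hk; exact hval k v hk
      obtain ⟨h1, h2, h3, h4⟩ :=
        ih (best.insert s (d + 1)) (accA ++ [(s, d + 1)]) hval'
          (fun x hx => hsrc x (List.mem_cons_of_mem _ hx))
      have hu : pvUndisc incoming (best.insert s (d + 1)) + 1 = pvUndisc incoming best :=
        pv_undisc_insert incoming best s (d + 1) hg (hsrc s (List.mem_cons_self))
      have hd : pvDisc (d + 1) best (s :: rest)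
          = ((pvDisc (d + 1) (best.insert s (d + 1)) rest).1,
             s :: (pvDisc (d + 1) (best.insert s (d + 1)) rest).2) := by
        simp [pvDisc, hcontains]
      refine ⟨?_, ?_, ?_, ?_⟩
      · rw [List.foldl_cons, hstepA, hd]; exact h1
      · rw [List.foldl_cons, hstepA, hd]
        simp only [List.map_cons] at *
        rw [h2, List.append_assoc]; rfl
      · rw [hd]; exact h3
      · rw [hd]; simp only [List.length_cons]; omega
    · -- existing key: value ≤ d+1, relaxation never fires; both skip
      have hnd : ¬ d + 1 < v := not_lt.mpr (hval s v hg)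
      have hcontains : best.contains s = true := by
        rw [PySem.Dict.contains_eq_isSome_get?, hg]; rfl
      have hstepA : pvStepA d (best, accA) s = (best, accA) := by
        unfold pvStepA; simp [hg, hnd]
      have hd : pvDisc (d + 1) best (s :: rest) = pvDisc (d + 1) best rest := by
        simp [pvDisc, hcontains]
      obtain ⟨h1, h2, h3, h4⟩ := ih best accA hval (fun x hx => hsrc x (List.mem_cons_of_mem _ hx))
      exact ⟨by rw [List.foldl_cons, hstepA, hd]; exact h1,
        by rw [List.foldl_cons, hstepA, hd]; exact h2,
        by rw [hd]; exact h3, by rw [hd]; exact h4⟩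

lemma pvDisc_append (d1 : Int) :
    ∀ (l1 l2 : List String) (best : PySem.Dict String Int),
      pvDisc d1 best (l1 ++ l2)
        = ((pvDisc d1 (pvDisc d1 best l1).1 l2).1,
           (pvDisc d1 best l1).2 ++ (pvDisc d1 (pvDisc d1 best l1).1 l2).2) := by
  intro l1
  induction l1 with
  | nil => intro l2 best; simp [pvDisc]
  | cons s rest ih =>
    intro l2 best
    by_cases hc : best.contains s
    · simp [pvDisc, hc, ih]
    · simp [pvDisc, hc, ih]

-- pvDisc's dict is the level-insert of its list
lemma pvDisc_fst (d1 : Int) :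
    ∀ (l : List String) (best : PySem.Dict String Int),
      (pvDisc d1 best l).1 = pvInsLevel best d1 (pvDisc d1 best l).2 := by
  intro l
  induction l with
  | nil => intro best; simp [pvDisc, pvInsLevel]
  | cons s rest ih =>
    intro best
    by_cases hc : best.contains s
    · simp [pvDisc, hc, ih]
    · simp [pvDisc, hc, ih, pvInsLevel]

lemma pv_contains_insLevel (best : PySem.Dict String Int) (d1 : Int) :
    ∀ (L : List String) (s : String),
      (pvInsLevel best d1 L).contains s = (best.contains s || L.contains s) := by
  intro L
  induction L generalizing best with
  | nil => intro s; simp [pvInsLevel]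
  | cons x xs ih =>
    intro s
    simp only [pvInsLevel, List.foldl_cons] at *
    rw [ih]
    by_cases hx : s = x
    · subst hx; simp
    · simp [PySem.Dict.contains_insert, hx, Bool.or_assoc]

lemma pv_contains_update (v : PySem.Set String) :
    ∀ (L : List String) (s : String),
      (PySem.Set.update v L).contains s = (v.contains s || L.contains s) := by
  intro L
  induction L generalizing v with
  | nil => intro s; simp [PySem.Set.update]
  | cons x xs ih =>
    intro s
    simp only [PySem.Set.update, List.foldl_cons] at *
    rw [ih]
    by_cases hcx : PySem.Set.contains v x
    · simp only [PySem.Set.add, hcx, if_pos]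
      by_cases hx : s = x
      · subst hx
        simp only [PySem.Set.contains, List.contains_eq_mem, decide_eq_true_eq] at hcx
        simp [hcx]
      · simp [PySem.Set.contains, hx]
    · simp only [PySem.Set.add, hcx, Bool.false_eq_true, if_neg, not_false_iff]
      by_cases hx : s = x
      · subst hx; simp [PySem.Set.contains]
      · simp [PySem.Set.contains, hx]

-- filter-then-ordered-dedup is streaming discovery
lemma pvDisc_dedup (d1 : Int) (best0 : PySem.Dict String Int) :
    ∀ (l : List String) (best : PySem.Dict String Int) (acc : PySem.Set String),
      (∀ s, best.contains s = (best0.contains s || acc.contains s)) →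
      (l.filter (fun s => !best0.contains s)).foldl PySem.Set.add acc
        = acc ++ (pvDisc d1 best l).2 := by
  intro l
  induction l with
  | nil => intro best acc _; simp [pvDisc]
  | cons s rest ih =>
    intro best acc h
    by_cases h0 : best0.contains s
    · have hb : best.contains s = true := by rw [h s, h0]; rfl
      simp only [List.filter_cons, h0, Bool.not_true, pvDisc, hb, if_pos, Bool.false_eq_true,
        if_neg, not_false_iff]
      exact ih best acc h
    · by_cases ha : PySem.Set.contains acc s
      · have hb : best.contains s = true := by
          rw [h s, ha]; simp
        have hadd : PySem.Set.add acc s = acc := by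
          unfold PySem.Set.add; rw [if_pos ha]
        simp only [List.filter_cons, h0, Bool.not_false, if_pos, List.foldl_cons, hadd,
          pvDisc, hb, if_pos]
        exact ih best acc h
      · have h0' : best0.contains s = false := by simpa using h0
        have ha' : PySem.Set.contains acc s = false := by simpa using ha
        have hb : best.contains s = false := by rw [h s, h0', ha']; rfl
        have hadd : PySem.Set.add acc s = acc ++ [s] := by
          unfold PySem.Set.add; rw [if_neg ha]
        have h' : ∀ t, (best.insert s d1).contains t
            = (best0.contains t || (acc ++ [s]).contains t) := by
          intro t
          rw [PySem.Dict.contains_insert, h t]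
          by_cases ht : t = s
          · subst ht; simp
          · have : (t == s) = false := by simpa using ht
            simp [this, PySem.Set.contains, ht, Bool.or_comm]
        simp only [List.filter_cons, h0, Bool.not_false, if_pos, List.foldl_cons, hadd,
          pvDisc, hb, Bool.false_eq_true, if_neg, not_false_iff]
        rw [ih (best.insert s d1) (acc ++ [s]) h', List.append_assoc]
        rfl

lemma pv_skip (incoming : List (String × List String)) (max_steps : Int) :
    ∀ (q : List (String × Int)) (fuel : Nat) (best : PySem.Dict String Int),
      (∀ p ∈ q, max_steps ≤ p.2) → q.length ≤ fuel →
      pvLoopA incoming max_steps fuel best q = best := by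
  intro q
  induction q with
  | nil => intro fuel best _ _; cases fuel <;> rfl
  | cons p rest ih =>
    intro fuel best hall hlen
    obtain ⟨node, depth⟩ := p
    cases fuel with
    | zero => simp at hlen
    | succ f =>
      have hd : max_steps ≤ depth := hall (node, depth) (List.mem_cons_self)
      rw [pvLoopA, if_pos hd]
      exact ih f best (fun x hx => hall x (List.mem_cons_of_mem _ hx)) (by simpa using Nat.lt_succ_iff.mp (by simpa using hlen))

-- processing one whole frontier at depth d: A realises pvDisc over the concatenated sources
lemma pv_level (incoming : List (String × List String)) (max_steps d : Int)
    (hms : ¬ max_steps ≤ d) :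
    ∀ (nodes : List String) (fuel : Nat) (best : PySem.Dict String Int) (l2 : List String),
      pvValB best (d + 1) →
      nodes.length + l2.length + pvUndisc incoming best < fuel →
      pvLoopA incoming max_steps fuel best
          (nodes.map (fun s => (s, d)) ++ l2.map (fun s => (s, d + 1)))
        = pvLoopA incoming max_steps (fuel - nodes.length)
            (pvDisc (d + 1) best (nodes.flatMap (fun node => pvGetSrcs incoming node))).1
            ((l2 ++ (pvDisc (d + 1) best (nodes.flatMap (fun node => pvGetSrcs incoming node))).2).map
              (fun s => (s, d + 1)))
      ∧ pvValB (pvDisc (d + 1) best (nodes.flatMap (fun node => pvGetSrcs incoming node))).1 (d + 1)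
      ∧ (pvDisc (d + 1) best (nodes.flatMap (fun node => pvGetSrcs incoming node))).2.length
          + pvUndisc incoming (pvDisc (d + 1) best (nodes.flatMap (fun node => pvGetSrcs incoming node))).1
        = pvUndisc incoming best := by
  intro nodes
  induction nodes with
  | nil =>
    intro fuel best l2 hval _
    refine ⟨?_, by simpa [pvDisc] using hval, by simp [pvDisc]⟩
    simp [pvDisc]
  | cons node rest ih =>
    intro fuel best l2 hval hfuel
    cases fuel with
    | zero => simp at hfuel
    | succ f =>
      obtain ⟨h1, h2, h3, h4⟩ :=
        pv_inner incoming d (pvGetSrcs incoming node) best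
          (rest.map (fun s => (s, d)) ++ l2.map (fun s => (s, d + 1))) hval
          (fun s hs => pv_mem_getSrcs hs)
      set r1 := pvDisc (d + 1) best (pvGetSrcs incoming node) with hr1
      have hstep : pvLoopA incoming max_steps (f + 1) best
          ((node :: rest).map (fun s => (s, d)) ++ l2.map (fun s => (s, d + 1)))
          = pvLoopA incoming max_steps f
              ((pvGetSrcs incoming node).foldl (pvStepA d)
                (best, rest.map (fun s => (s, d)) ++ l2.map (fun s => (s, d + 1)))).1
              ((pvGetSrcs incoming node).foldl (pvStepA d)
                (best, rest.map (fun s => (s, d)) ++ l2.map (fun s => (s, d + 1)))).2 := by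
        rw [List.map_cons, List.cons_append, pvLoopA, if_neg hms]
      have harg : rest.map (fun s => (s, d)) ++ l2.map (fun s => (s, d + 1)) ++
          r1.2.map (fun s => (s, d + 1))
          = rest.map (fun s => (s, d)) ++ (l2 ++ r1.2).map (fun s => (s, d + 1)) := by
        rw [List.map_append, List.append_assoc]
      obtain ⟨ih1, ih2, ih3⟩ := ih f r1.1 (l2 ++ r1.2) h3 (by
        simp only [List.length_cons, List.length_append] at hfuel ⊢
        omega)
      have hsplit := pvDisc_append (d + 1) (pvGetSrcs incoming node)
        (rest.flatMap (fun node => pvGetSrcs incoming node)) best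
      have hflat : (node :: rest).flatMap (fun node => pvGetSrcs incoming node)
          = pvGetSrcs incoming node ++ rest.flatMap (fun node => pvGetSrcs incoming node) := by
        simp
      have hfa : f + 1 - (node :: rest).length = f - rest.length := by
        simp [Nat.succ_sub_succ]
      refine ⟨?_, ?_, ?_⟩
      · rw [hstep, h1, h2, harg, ih1, hfa, hflat, hsplit, ← hr1]
        rw [List.append_assoc]
      · rw [hflat, hsplit, ← hr1]; exact ih2
      · rw [hflat, hsplit, ← hr1]
        simp only [List.length_append]
        omega

lemma pv_loopB_tail (incoming : List (String × List String)) :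
    ∀ (n : Nat) (v : PySem.Set String) (levels : List (List String)) (last : List String),
      pvLoopB incoming n v levels last = levels ++ pvTail incoming n v last := by
  intro n
  induction n with
  | zero => intro v levels last; simp [pvLoopB, pvTail]
  | succ m ih =>
    intro v levels last
    by_cases he : last.isEmpty
    · simp [pvLoopB, pvTail, he]
    · simp only [pvLoopB, pvTail, he, if_neg, Bool.false_eq_true, not_false_iff]
      rw [ih, List.append_assoc]
      rfl

lemma pv_enum_fold :
    ∀ (Ls : List (List String)) (best : PySem.Dict String Int) (d : Int),
      (PySem.List.enumerate Ls d).foldl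
          (fun dict p => p.2.foldl (fun dict node => dict.insert node p.1) dict) best
        = pvInsLevels best d Ls := by
  intro Ls
  induction Ls with
  | nil => intro best d; simp [PySem.List.enumerate_nil, pvInsLevels]
  | cons L rest ih =>
    intro best d
    rw [PySem.List.enumerate_cons, List.foldl_cons, ih]
    rfl

-- main simulation: A's queue loop computes the level-insert of the pending levels
lemma pv_sim (incoming : List (String × List String)) (max_steps : Int) :
    ∀ (fuel : Nat) (d : Int) (best : PySem.Dict String Int) (v : PySem.Set String)
      (frontier : List String),
      pvValB best d → pvAgree v best →
      frontier.length + pvUndisc incoming best < fuel →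
      pvLoopA incoming max_steps fuel best (frontier.map (fun s => (s, d)))
        = pvInsLevels best (d + 1) (pvTail incoming (max_steps - d).toNat v frontier) := by
  intro fuel
  induction fuel using Nat.strong_induction_on with
  | _ fuel IH =>
    intro d best v frontier hval hagree hfuel
    cases hf : frontier with
    | nil =>
      have hA : pvLoopA incoming max_steps fuel best [] = best := by cases fuel <;> rfl
      have hT : pvTail incoming (max_steps - d).toNat v [] = [] := by
        cases (max_steps - d).toNat <;> simp [pvTail]
      simp only [List.map_nil, hA, hT, pvInsLevels]
    | cons x xs =>
      subst hf
      by_cases hms : max_steps ≤ d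
      · have hn : (max_steps - d).toNat = 0 := by omega
        rw [hn]
        have hT : pvTail incoming 0 v (x :: xs) = [] := rfl
        rw [hT]
        show pvLoopA incoming max_steps fuel best ((x :: xs).map (fun s => (s, d))) = best
        apply pv_skip incoming max_steps
        · intro p hp
          rcases List.mem_map.mp hp with ⟨s, _, rfl⟩
          exact hms
        · rw [List.length_map]; omega
      · have hn : (max_steps - d).toNat = (max_steps - (d + 1)).toNat + 1 := by omega
        have hval' : pvValB best (d + 1) := fun k w h => le_trans (hval k w h) (by omega)
        obtain ⟨l1, l2, l3⟩ := pv_level incoming max_steps d hms (x :: xs) fuel best []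
          hval' (by simpa using hfuel)
        set r := pvDisc (d + 1) best ((x :: xs).flatMap (fun node => pvGetSrcs incoming node)) with hr
        have hcur : pvNewLevel incoming v (x :: xs) = r.2 := by
          unfold pvNewLevel
          rw [PySem.List.dedup_eq_ofList, PySem.Set.ofList_eq_foldl]
          have hfe : (fun s => !(PySem.Set.contains v s)) = (fun s => !best.contains s) :=
            funext fun s => by rw [hagree s]
          rw [hfe]
          simpa using pvDisc_dedup (d + 1) best
            ((x :: xs).flatMap (fun node => pvGetSrcs incoming node)) best []
            (by intro t; simp)
        have hfst : r.1 = pvInsLevel best (d + 1) r.2 := pvDisc_fst (d + 1) _ best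
        have hagree' : pvAgree (PySem.Set.update v r.2) r.1 := by
          intro s
          rw [pv_contains_update, hfst, pv_contains_insLevel, hagree s]
        have htail : pvTail incoming (max_steps - d).toNat v (x :: xs)
            = r.2 :: pvTail incoming (max_steps - (d + 1)).toNat (PySem.Set.update v r.2) r.2 := by
          rw [hn, pvTail]
          simp only [List.isEmpty_cons, Bool.false_eq_true, if_neg, not_false_iff]
          rw [hcur]
        have hdec : fuel - (x :: xs).length < fuel := by
          simp only [List.length_cons] at hfuel ⊢; omega
        have hfuel' : r.2.length + pvUndisc incoming r.1 < fuel - (x :: xs).length := by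
          simp only [List.length_cons] at hfuel ⊢
          omega
        have hIH := IH (fuel - (x :: xs).length) hdec (d + 1) r.1 (PySem.Set.update v r.2) r.2
          l2 hagree' hfuel'
        have hms1 : max_steps - (d + 1) = max_steps - d - 1 := by omega
        have hl1' : pvLoopA incoming max_steps fuel best ((x :: xs).map (fun s => (s, d)))
            = pvLoopA incoming max_steps (fuel - (x :: xs).length) r.1
                (r.2.map (fun s => (s, d + 1))) := by
          have := l1
          simpa using this
        rw [hl1', hIH, htail]
        show pvInsLevels r.1 (d + 1 + 1) _ = pvInsLevels (pvInsLevel best (d + 1) r.2) (d + 1 + 1) _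
        rw [hfst]

-- ===== VERDICT (by name: the statement is the Claim_ definition above) =====
theorem bfs_upstream_unsigned_py_spec : Claim_equal_bfs_upstream_unsigned_py := by
  intro incoming tf max_steps _
  unfold Spec_bfs_upstream_unsigned_py bfs_upstream_unsigned_py bfs_upstream_unsigned_py_alt
  congr 1
  rw [pv_loopB_tail, pv_enum_fold]
  have hval : pvValB (PySem.Dict.insert PySem.Dict.empty tf 0) 0 := by
    intro k v h
    rw [PySem.Dict.get?_insert] at h
    by_cases hk : k = tf
    · rw [if_pos hk] at h; cases h; omega
    · rw [if_neg hk] at h; rw [PySem.Dict.get?_empty] at h; cases h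
  have hagree : pvAgree (PySem.Set.ofList [tf]) (PySem.Dict.insert PySem.Dict.empty tf 0) := by
    intro s
    have hset : PySem.Set.ofList [tf] = [tf] := rfl
    rw [hset, PySem.Dict.contains_insert]
    by_cases h : s = tf
    · subst h; simp [PySem.Set.contains]
    · simp [PySem.Set.contains, h]
  have hu : pvUndisc incoming (PySem.Dict.insert PySem.Dict.empty tf 0)
      ≤ (pvAllSrcs incoming).length := List.length_filter_le _ _
  have hfuel : ([tf] : List String).length +
      pvUndisc incoming (PySem.Dict.insert PySem.Dict.empty tf 0)
      < (pvAllSrcs incoming).length + 2 := by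
    simp only [List.length_cons, List.length_nil]
    omega
  have hsim := pv_sim incoming max_steps ((pvAllSrcs incoming).length + 2) 0
    (PySem.Dict.insert PySem.Dict.empty tf 0) (PySem.Set.ofList [tf]) [tf] hval hagree hfuel
  rw [Int.sub_zero] at hsim
  have hlhs : ([tf] : List String).map (fun s => (s, (0 : Int))) = [(tf, 0)] := rfl
  rw [hlhs] at hsim
  rw [hsim]
  rfl
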